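-- pv_equiv track=rewrite | github.com/hedyorg/hedy | converter_unparser.py | creates_tree
-- ===== SOURCE A (Python) =====
-- def get_groupings(rule, seperators):
--     group = ['/', '"', '(', '[']
--     sets = {"(" : ")", "[" : "]"}
--     group_symbol = []
--     groupings = []
--     start = 0
--     current = 0
--
--     while (current < len(rule)):
--         while current < len(rule) and rule[current] == '\\': #escape character
--             current += 2
--         if (current >= len(rule)): break
--
--         if (group_symbol == []): # currently not in group
--             if (rule[current] in group):
--                 group_symbol.append(rule[current])
--             elif (rule[current] in seperators):
--                 if (start != current):
--                     groupings.append(rule[start:current+1])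
--                 start = current + 1
--         else: # currently in group
--             if (rule[current] == group_symbol[-1]):
--                 if (group_symbol[-1] not in sets):
--                     group_symbol.pop()
--                 else:
--                     group_symbol.append(rule[current])
--             elif group_symbol[-1] in sets and rule[current] == sets[group_symbol[-1]]:
--                 group_symbol.pop()
--         current += 1
--
--     if (start != current):
--         groupings.append(rule[start:current])
--
--     return groupings
--
-- def creates_tree(grammar, group):
--     options = get_groupings(group.strip(), [' ', '+', '?', '*', '|'])
--     optionz = []
--     for option in options:
--         if option[-1] == "|":
--             option = option[0:-1]
--         optionz.append(option.strip())
--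
--     for option in optionz:
--         #call creates_tree for section with *,+,?
--         if (option[-1] == '*' or option[-1] == '+' or option[-1] == '?'):
--             if (creates_tree(grammar, option[0:-1])):
--                 return True
--         # call creates_tree for groupings () and []
--         elif (option[0] == "(" or option[0] == "["):
--             if (creates_tree(grammar, option[1:-1])):
--                 return True
--         # if it starts with _ not in tree, but should call creates_tree
--         elif option[0] == "_":
--             new_rule = grammar.get(option)
--             if new_rule != None:
--                 if creates_tree(grammar, new_rule):
--                     return True
--         # If it isn't "text", it is in tree
--         elif option[0] != '"':
--             return True
--
--     return False
-- ===== SOURCE B (Python) =====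
-- # Single-pass character tokenizer (buffer + stack, no index arithmetic) feeding a
-- # short-circuit any() classifier; same results as A wherever A returns normally (and it raises where A raises).
-- _SEPS = " +?*|"
-- _OPENERS = '/"(['
-- _CLOSERS = {'(': ')', '[': ']'}
--
--
-- def _tokens(rule):
--     out, buf, stack = [], [], []
--     chars = iter(rule)
--     for c in chars:
--         while c == '\\':            # escape: the next char is taken verbatim
--             buf.append(c)
--             c = next(chars, None)
--             if c is None:
--                 break
--             buf.append(c)
--             c = next(chars, None)
--         if c is None:
--             break
--         if not stack:
--             if c in _OPENERS:
--                 stack.append(c)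
--                 buf.append(c)
--             elif c in _SEPS:
--                 if buf:
--                     buf.append(c)
--                     out.append(''.join(buf))
--                     buf = []
--             else:
--                 buf.append(c)
--         else:
--             top = stack[-1]
--             if c == top:
--                 if top in _CLOSERS:
--                     stack.append(c)
--                 else:
--                     stack.pop()
--             elif top in _CLOSERS and c == _CLOSERS[top]:
--                 stack.pop()
--             buf.append(c)
--     if buf:
--         out.append(''.join(buf))
--     return out
--
--
-- def _option_of(tok):
--     if tok.endswith('|'):
--         tok = tok[:-1]
--     return tok.strip()
--
--
-- def creates_tree(grammar, group):
--     def hit(opt):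
--         last, first = opt[-1], opt[0]
--         if last in '*+?':
--             return expands(opt[:-1])
--         if first in '([':
--             return expands(opt[1:-1])
--         if first == '_':
--             nxt = grammar.get(opt)
--             return nxt is not None and expands(nxt)
--         return first != '"'
--
--     def expands(rule):
--         return any(hit(_option_of(t)) for t in _tokens(rule.strip()))
--
--     return expands(group)
-- ===== Notes on version B (the rewrite author's own statement) =====
-- stated objective: simpler
-- what changed: A's index-and-slice two-phase scanner (while loops over positions, slice extraction, then a second pass stripping bars and a recursive early-return chain) is replaced by a single-pass character tokenizer that accumulates a buffer and a bracket stack while consuming an iterator, feeding a short-circuit any() over classified options.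
import Mathlib
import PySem

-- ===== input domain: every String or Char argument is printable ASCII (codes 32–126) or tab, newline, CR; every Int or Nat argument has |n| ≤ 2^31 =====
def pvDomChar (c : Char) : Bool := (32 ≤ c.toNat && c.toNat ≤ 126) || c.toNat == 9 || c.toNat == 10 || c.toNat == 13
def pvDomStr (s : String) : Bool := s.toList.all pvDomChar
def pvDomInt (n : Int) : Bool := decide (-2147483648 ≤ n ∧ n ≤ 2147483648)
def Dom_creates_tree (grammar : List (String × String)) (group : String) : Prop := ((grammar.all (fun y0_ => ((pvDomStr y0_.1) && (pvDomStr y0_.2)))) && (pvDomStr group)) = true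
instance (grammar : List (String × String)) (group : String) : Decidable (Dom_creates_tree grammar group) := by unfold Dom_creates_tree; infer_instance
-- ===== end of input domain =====

-- B replaces A's index/slice two-phase scanner by a one-pass buffer+stack tokenizer and a
-- short-circuit any() classifier (objective: simpler); the ports agree on every input.

-- ===== PORT A =====
-- group = ['/', '"', '(', '[']
def pvGroupA : List Char := ['/', '"', '(', '[']
-- sets = {"(" : ")", "[" : "]"}  (lookup form)
def pvSetsA (c : Char) : Option Char := if c = '(' then some ')' else if c = '[' then some ']' else none
-- seperators argument of the single call site
def pvSepsA : List Char := [' ', '+', '?', '*', '|']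

-- termination measures for the while-loop ports (cited by name in decreasing_by)
theorem pvTermSkip (L c : Nat) (h : c < L) : L - (c + 2) < L - c := by omega
theorem pvTermGG (L c0 c1 : Nat) (hle : c0 ≤ c1) (hlt : c1 < L) : L - (c1 + 1) < L - c0 := by omega
theorem pvTermT2 (a : Char) (l : List Char) : l.length < (a :: l).length := by simp
theorem pvTermT1 (a b : Char) (l : List Char) : l.length < (a :: b :: l).length :=
  Nat.lt_trans (pvTermT2 b l) (pvTermT2 a (b :: l))

-- inner 'while current < len(rule) and rule[current] == '\\': current += 2'
def pvSkipEsc (rule : List Char) (current : Nat) : Nat :=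
  if h : current < rule.length ∧ rule.getD current ' ' = '\\' then pvSkipEsc rule (current + 2)
  else current
termination_by rule.length - current
decreasing_by exact pvTermSkip rule.length current h.1

-- needed by pvGGloop's termination proof
theorem pvSkipEsc_ge (rule : List Char) (current : Nat) : current ≤ pvSkipEsc rule current := by
  rw [pvSkipEsc]
  split
  · next h => exact Nat.le_trans (by omega) (pvSkipEsc_ge rule (current + 2))
  · exact Nat.le_refl _
termination_by rule.length - current
decreasing_by omega

-- outer while loop of get_groupings; state (group_symbol (head = top), groupings, start, current)
def pvGGloop (rule : List Char) (seps : List Char) (gsym : List Char) (acc : List (List Char))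
    (start current : Nat) : List (List Char) × Nat × Nat :=
  if h : current < rule.length then
    let cur := pvSkipEsc rule current
    if h2 : rule.length ≤ cur then (acc, start, cur)
    else
      let c := rule.getD cur ' '
      match gsym with
      | [] =>
        if c ∈ pvGroupA then pvGGloop rule seps [c] acc start (cur + 1)
        else if c ∈ seps then
          if start ≠ cur then
            pvGGloop rule seps [] (acc ++ [PySem.List.slice rule (some (start : Int)) (some ((cur : Int) + 1))]) (cur + 1) (cur + 1)
          else pvGGloop rule seps [] acc (cur + 1) (cur + 1)
        else pvGGloop rule seps [] acc start (cur + 1)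
      | top :: rest =>
        if c = top then
          if (pvSetsA top).isNone then pvGGloop rule seps rest acc start (cur + 1)
          else pvGGloop rule seps (c :: top :: rest) acc start (cur + 1)
        else if pvSetsA top = some c then pvGGloop rule seps rest acc start (cur + 1)
        else pvGGloop rule seps (top :: rest) acc start (cur + 1)
  else (acc, start, current)
termination_by rule.length - current
decreasing_by all_goals exact pvTermGG rule.length current (pvSkipEsc rule current) (pvSkipEsc_ge rule current) (Nat.not_le.mp h2)

def pvGetGroupings (rule : List Char) (seps : List Char) : List (List Char) :=
  let r := pvGGloop rule seps [] [] 0 0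
  if r.2.1 ≠ r.2.2 then r.1 ++ [PySem.List.slice rule (some (r.2.1 : Int)) (some (r.2.2 : Int))] else r.1

-- the second for-loop of creates_tree, with the recursive calls at fuel f
def pvCTloop (recur : List Char → Bool) (grammar : List (String × String)) :
    List (List Char) → Bool
  | [] => false
  | option :: rest =>
    match PySem.List.pyGet? option (-1), PySem.List.pyGet? option 0 with
    | some l, some h =>
      if l = '*' ∨ l = '+' ∨ l = '?' then
        if recur (PySem.List.slice option (some 0) (some (-1))) then true
        else pvCTloop recur grammar rest
      else if h = '(' ∨ h = '[' then
        if recur (PySem.List.slice option (some 1) (some (-1))) then true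
        else pvCTloop recur grammar rest
      else if h = '_' then
        match grammar.lookup (String.ofList option) with
        | some new_rule => if recur new_rule.toList then true else pvCTloop recur grammar rest
        | none => pvCTloop recur grammar rest
      else if h ≠ '"' then true
      else pvCTloop recur grammar rest
    | _, _ => pvCTloop recur grammar rest  -- Python raises IndexError here (empty option)

def pvCT (grammar : List (String × String)) : Nat → List Char → Bool
  | 0, _ => false   -- fuel device (totality guard): whenever the Python terminates its recursion visits each
                    -- '_'-key at most once (a revisit is a cycle = RecursionError), so its depth is under the
                    -- fuel |group| + Σ(|value|+1) + 2 passed below; both ports use the same fuel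
  | f + 1, group =>
    let options := pvGetGroupings (PySem.Chars.strip group) pvSepsA
    let optionz := options.foldl (fun acc option =>
      acc ++ [PySem.Chars.strip
        (if PySem.List.pyGet? option (-1) = some '|' then PySem.List.slice option (some 0) (some (-1)) else option)]) []
    pvCTloop (pvCT grammar f) grammar optionz

def creates_tree (grammar : List (String × String)) (group : String) : Bool :=
  pvCT grammar (group.toList.length + grammar.foldl (fun n p => n + p.2.toList.length + 1) 0 + 2) group.toList

-- ===== PORT B =====
def pvOpeners : List Char := "/\"([".toList
def pvSepsB : List Char := " +?*|".toList
def pvClosers (c : Char) : Option Char := ([('(', ')'), ('[', ']')] : List (Char × Char)).lookup c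

-- single pass over the characters: token buffer, bracket stack, emitted tokens
def pvTokB (stack buf : List Char) (acc : List (List Char)) : List Char → List (List Char)
  | [] => if buf.isEmpty then acc else acc ++ [buf]
  | c :: rest =>
    if c = '\\' then
      match rest with
      | [] => acc ++ [buf ++ ['\\']]
      | d :: rest' => pvTokB stack (buf ++ ['\\', d]) acc rest'
    else
      match stack with
      | [] =>
        if c ∈ pvOpeners then pvTokB [c] (buf ++ [c]) acc rest
        else if c ∈ pvSepsB then
          if buf.isEmpty then pvTokB [] [] acc rest
          else pvTokB [] [] (acc ++ [buf ++ [c]]) rest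
        else pvTokB [] (buf ++ [c]) acc rest
      | top :: stk =>
        let stack' :=
          if c = top then (if top = '(' ∨ top = '[' then c :: top :: stk else stk)
          else if pvClosers top = some c then stk
          else top :: stk
        pvTokB stack' (buf ++ [c]) acc rest
termination_by xs => xs.length
decreasing_by all_goals first
  | exact pvTermT1 _ _ _
  | exact pvTermT2 _ _

def pvOptOf (tok : List Char) : List Char :=
  PySem.Chars.strip (if PySem.Chars.endswith tok ['|'] then tok.dropLast else tok)

def pvExpands (grammar : List (String × String)) : Nat → List Char → Bool
  | 0, _ => false   -- same fuel device (totality guard) as in pvCT, with the same fuel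
  | f + 1, rule =>
    ((pvTokB [] [] [] (PySem.Chars.strip rule)).map pvOptOf).any fun opt =>
      -- on an empty opt Source B raises IndexError at opt[-1]; the elim's 'false' stands in for that
      opt.getLast?.elim false fun last =>
        opt.head?.elim false fun first =>
          if last ∈ (['*', '+', '?'] : List Char) then pvExpands grammar f opt.dropLast
          else if first ∈ (['(', '['] : List Char) then pvExpands grammar f (opt.drop 1).dropLast
          else if first = '_' then
            (grammar.lookup (String.ofList opt)).elim false fun nxt => pvExpands grammar f nxt.toList
          else decide (first ≠ '"')

def creates_tree_alt (grammar : List (String × String)) (group : String) : Bool :=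
  pvExpands grammar (group.toList.length + grammar.foldl (fun n p => n + p.2.toList.length + 1) 0 + 2) group.toList

-- ===== PRECONDITION & SPEC =====
-- No Pre_: with the shared fuel bound both ports are total and agree on every input, so the
-- equivalence is claimed unconditionally.  (Where the PYTHONS raise — IndexError on a
-- whitespace-only option, RecursionError on a reference cycle — both A and B raise alike,
-- and the ports' value there is the fuel device's 'false'.)
def Spec_creates_tree (grammar : List (String × String)) (group : String) (out : Bool) : Prop := out = creates_tree_alt grammar group
instance (grammar : List (String × String)) (group : String) (out : Bool) : Decidable (Spec_creates_tree grammar group out) := by unfold Spec_creates_tree; infer_instance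

-- ===== CLAIM (what is proved, stated in full; the proofs are below) =====
def Claim_equal_creates_tree : Prop := ∀ (grammar : List (String × String)) (group : String), Dom_creates_tree grammar group → Spec_creates_tree grammar group (creates_tree grammar group)

-- ===== LEMMAS AND PROOFS =====
theorem hGetD (rule : List Char) (current : Nat) (hc : current < rule.length) :
    rule.getD current ' ' = rule[current] := by
  simp [List.getD_eq_getElem?_getD, List.getElem?_eq_getElem hc]

theorem takeSucc (l : List Char) (s c : Nat) (h1 : s ≤ c) (h2 : c < l.length) :
    (l.drop s).take (c + 1 - s) = (l.drop s).take (c - s) ++ [l[c]] := by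
  have h3 : c + 1 - s = (c - s) + 1 := by omega
  rw [h3, List.take_add_one]
  have h4 : (l.drop s)[c - s]? = some l[c] := by
    rw [List.getElem?_drop]
    have h5 : s + (c - s) = c := by omega
    rw [h5, List.getElem?_eq_getElem h2]
  simp [h4]

theorem dropBuf (l : List Char) (s c : Nat) (h1 : s ≤ c) :
    l.drop s = (l.drop s).take (c - s) ++ l.drop c := by
  conv_lhs => rw [← List.take_append_drop (c - s) (l.drop s)]
  rw [List.drop_drop]
  congr 2
  omega

theorem bufNE (l : List Char) (s c : Nat) (h1 : s ≤ c) (h2 : c ≤ l.length) (h3 : s ≠ c) :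
    ((l.drop s).take (c - s)).isEmpty = false := by
  simp
  omega

theorem gg_esc (rule seps gsym : List Char) (acc : List (List Char)) (start current : Nat)
    (hc : current < rule.length) (he : rule.getD current ' ' = '\\') :
    pvGGloop rule seps gsym acc start current = pvGGloop rule seps gsym acc start (current + 2) := by
  rw [pvGGloop, pvGGloop]
  have hskip : pvSkipEsc rule current = pvSkipEsc rule (current + 2) := by
    conv_lhs => rw [pvSkipEsc]
    rw [dif_pos ⟨hc, he⟩]
  by_cases h2 : current + 2 < rule.length
  · simp only [dif_pos hc, dif_pos h2, hskip]
  · have h3 : pvSkipEsc rule (current + 2) = current + 2 := by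
      rw [pvSkipEsc]; simp; omega
    simp only [dif_pos hc, dif_neg h2, hskip, h3]
    rw [dif_pos (by omega : rule.length ≤ current + 2)]

theorem tokB_nil (stack buf : List Char) (acc : List (List Char)) :
    pvTokB stack buf acc [] = if buf.isEmpty then acc else acc ++ [buf] := by
  rw [pvTokB.eq_def]

theorem tokB_esc1 (stack buf : List Char) (acc : List (List Char)) :
    pvTokB stack buf acc ['\\'] = acc ++ [buf ++ ['\\']] := by
  rw [pvTokB.eq_def]; simp

theorem tokB_esc2 (stack buf : List Char) (acc : List (List Char)) (d : Char) (rest' : List Char) :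
    pvTokB stack buf acc ('\\' :: d :: rest') = pvTokB stack (buf ++ ['\\', d]) acc rest' := by
  rw [pvTokB.eq_def]; simp

theorem tokB_empty (buf : List Char) (acc : List (List Char)) (c : Char) (rest : List Char)
    (hne : c ≠ '\\') :
    pvTokB [] buf acc (c :: rest) =
      (if c ∈ pvOpeners then pvTokB [c] (buf ++ [c]) acc rest
       else if c ∈ pvSepsB then
         if buf.isEmpty then pvTokB [] [] acc rest
         else pvTokB [] [] (acc ++ [buf ++ [c]]) rest
       else pvTokB [] (buf ++ [c]) acc rest) := by
  rw [pvTokB.eq_def]; simp [hne]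

theorem tokB_grp (buf : List Char) (acc : List (List Char)) (c top : Char) (stk rest : List Char)
    (hne : c ≠ '\\') :
    pvTokB (top :: stk) buf acc (c :: rest) =
      pvTokB (if c = top then (if top = '(' ∨ top = '[' then c :: top :: stk else stk)
              else if pvClosers top = some c then stk else top :: stk) (buf ++ [c]) acc rest := by
  rw [pvTokB.eq_def]; simp [hne]

def pvFin (rule : List Char) (r : List (List Char) × Nat × Nat) : List (List Char) :=
  if r.2.1 ≠ r.2.2 then r.1 ++ [PySem.List.slice rule (some (r.2.1 : Int)) (some (r.2.2 : Int))] else r.1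

theorem sim (rule : List Char) (gsym : List Char) (acc : List (List Char)) (start current : Nat)
    (h1 : start ≤ current) (h2 : current ≤ rule.length) :
    pvFin rule (pvGGloop rule pvSepsA gsym acc start current)
      = pvTokB gsym ((rule.drop start).take (current - start)) acc (rule.drop current) := by
  by_cases hc : current < rule.length
  · have hdrop : rule.drop current = rule[current] :: rule.drop (current + 1) :=
      List.drop_eq_getElem_cons hc
    have hgd : rule.getD current ' ' = rule[current] := hGetD rule current hc
    by_cases hesc : rule[current] = '\\'
    · rw [gg_esc rule pvSepsA gsym acc start current hc (by rw [hgd, hesc])]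
      rcases hre : rule.drop (current + 1) with _ | ⟨d, rest'⟩
      · -- the backslash is the last character: current + 1 = rule.length
        have hl : current + 1 = rule.length := by
          have h5 := congrArg List.length hre
          simp at h5; omega
        rw [pvGGloop, dif_neg (by omega : ¬ current + 2 < rule.length)]
        rw [hdrop, hesc, hre, tokB_esc1]
        unfold pvFin
        rw [if_pos (by simp; omega : (acc, start, current + 2).2.1 ≠ (acc, start, current + 2).2.2)]
        simp only [PySem.List.slice_natCast]
        congr 1
        have hfull : (rule.drop start).take (current + 2 - start) = rule.drop start := by
          apply List.take_of_length_le; simp; omega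
        have hx : List.drop start rule = (rule.drop start).take (current - start) ++ ['\\'] := by
          have h6 := dropBuf rule start current h1
          rw [hdrop, hesc, hre] at h6
          exact h6
        conv_lhs => rw [hfull, hx]
      · -- an escaped pair: step current by two and use the IH
        have hl2 : current + 2 ≤ rule.length := by
          have h5 := congrArg List.length hre
          simp at h5; omega
        have hdrop1 : rule.drop (current + 1) = rule[current + 1] :: rule.drop (current + 2) :=
          List.drop_eq_getElem_cons (by omega)
        have hd : rule[current + 1] = d ∧ rule.drop (current + 2) = rest' := by
          rw [hre] at hdrop1; exact ⟨(List.cons.injEq _ _ _ _ ▸ hdrop1).1.symm, ((List.cons.injEq _ _ _ _ ▸ hdrop1).2).symm⟩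
        rw [sim rule gsym acc start (current + 2) (by omega) hl2]
        rw [hdrop, hesc, hre, tokB_esc2]
        have hb2 : (rule.drop start).take (current + 2 - start)
            = (rule.drop start).take (current - start) ++ ['\\', d] := by
          rw [takeSucc rule start (current + 1) (by omega) (by omega),
              takeSucc rule start current h1 hc]
          simp [hesc]
          exact hd.1
        rw [hb2, hd.2]
    · -- ordinary character
      have hskip : pvSkipEsc rule current = current := by
        rw [pvSkipEsc, dif_neg]
        intro hx
        rw [hgd] at hx
        exact hesc hx.2
      have hbufc : (rule.drop start).take (current + 1 - start)
          = (rule.drop start).take (current - start) ++ [rule[current]] :=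
        takeSucc rule start current h1 hc
      rw [pvGGloop, dif_pos hc]
      simp only [hskip, hgd, dif_neg (by omega : ¬ rule.length ≤ current)]
      rw [hdrop]
      cases gsym with
      | nil =>
        dsimp only
        rw [tokB_empty _ _ _ _ hesc]
        have hOp : pvOpeners = pvGroupA := by decide
        have hSp : pvSepsB = pvSepsA := by decide
        rw [hOp, hSp]
        by_cases hg : rule[current] ∈ pvGroupA
        · rw [if_pos hg, if_pos hg,
              sim rule [rule[current]] acc start (current + 1) (by omega) (by omega), hbufc]
        · rw [if_neg hg, if_neg hg]
          by_cases hsep : rule[current] ∈ pvSepsA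
          · rw [if_pos hsep, if_pos hsep]
            by_cases hs : start = current
            · rw [if_neg (by omega : ¬ start ≠ current),
                  if_pos (by simp [hs] : ((rule.drop start).take (current - start)).isEmpty = true),
                  sim rule [] acc (current + 1) (current + 1) (by omega) (by omega)]
              norm_num
            · rw [if_pos hs, if_neg (by simp [bufNE rule start current h1 h2 hs]),
                  sim rule [] _ (current + 1) (current + 1) (by omega) (by omega)]
              have hcast : ((current : Int) + 1) = ((current + 1 : Nat) : Int) := by push_cast; ring
              rw [hcast, PySem.List.slice_natCast, hbufc]
              simp
          · rw [if_neg hsep, if_neg hsep,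
                sim rule [] acc start (current + 1) (by omega) (by omega), hbufc]
      | cons top stk =>
        dsimp only
        rw [tokB_grp _ _ _ _ _ _ hesc]
        have hCl : pvClosers = pvSetsA := by
          funext c
          by_cases h1 : c = '(' <;> by_cases h2 : c = '[' <;>
            simp [pvClosers, pvSetsA, List.lookup, h1, h2, beq_eq_false_iff_ne.mpr]
        rw [hCl]
        by_cases h7 : rule[current] = top
        · rw [if_pos h7, if_pos h7]
          by_cases h8 : top = '(' ∨ top = '['
          · rw [if_neg (by rcases h8 with h | h <;> simp [pvSetsA, h]
                  : ¬ (pvSetsA top).isNone = true),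
                if_pos h8,
                sim rule _ acc start (current + 1) (by omega) (by omega), hbufc]
          · rw [if_pos (by rcases not_or.mp h8 with ⟨ha, hb⟩; simp [pvSetsA, ha, hb]
                  : (pvSetsA top).isNone = true),
                if_neg h8,
                sim rule stk acc start (current + 1) (by omega) (by omega), hbufc]
        · rw [if_neg h7, if_neg h7]
          by_cases h9 : pvSetsA top = some rule[current]
          · rw [if_pos h9, if_pos h9,
                sim rule stk acc start (current + 1) (by omega) (by omega), hbufc]
          · rw [if_neg h9, if_neg h9,
                sim rule (top :: stk) acc start (current + 1) (by omega) (by omega), hbufc]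
  · -- loop exit: current = rule.length
    have hcl : current = rule.length := by omega
    rw [pvGGloop, dif_neg hc, List.drop_eq_nil_iff.mpr (by omega : rule.length ≤ current), tokB_nil]
    unfold pvFin
    by_cases hs : start = current
    · simp [hs]
    · rw [if_pos (by simpa using hs), if_neg (by simp [bufNE rule start current h1 h2 hs])]
      simp only [PySem.List.slice_natCast]
termination_by rule.length - current
decreasing_by all_goals omega

theorem tok_eq' (rule : List Char) : pvGetGroupings rule pvSepsA = pvTokB [] [] [] rule := by
  have h := sim rule [] [] 0 0 (Nat.le_refl 0) (Nat.zero_le _)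
  unfold pvFin at h
  unfold pvGetGroupings
  simpa using h

theorem slice_1_neg1 (o : List Char) :
    PySem.List.slice o (some 1) (some (-1)) = (o.drop 1).dropLast := by
  cases o with
  | nil => simp [PySem.List.slice]
  | cons c tl =>
    simp [PySem.List.slice, PySem.List.clampIdx, List.dropLast_eq_take]
    split <;> omega

theorem ends_bar (l : List Char) (a : Char) :
    PySem.Chars.endswith (l ++ [a]) ['|'] = (a == '|') := by
  simp [PySem.Chars.endswith, List.isSuffixOf, List.isPrefixOf]
  exact eq_comm

theorem opt_eq (option : List Char) :
    PySem.Chars.strip (if PySem.List.pyGet? option (-1) = some '|'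
      then PySem.List.slice option (some 0) (some (-1)) else option) = pvOptOf option := by
  unfold pvOptOf
  rw [PySem.List.pyGet?_neg_one]
  rcases List.eq_nil_or_concat option with rfl | ⟨l, a, rfl⟩
  · simp [PySem.Chars.endswith]
  · by_cases ha : a = '|'
    · rw [if_pos (by simp [ha]), if_pos (by simp [ends_bar, ha])]
      simp [ha, PySem.List.slice_to_neg_one]
    · rw [if_neg (by simp [ha]), if_neg (by simp [ends_bar, ha])]

theorem loop_any (grammar : List (String × String)) (f : Nat)
    (IH : ∀ g, pvCT grammar f g = pvExpands grammar f g) :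
    ∀ L : List (List Char), pvCTloop (pvCT grammar f) grammar L
      = L.any (fun opt =>
          opt.getLast?.elim false fun last =>
            opt.head?.elim false fun first =>
              if last ∈ (['*', '+', '?'] : List Char) then pvExpands grammar f opt.dropLast
              else if first ∈ (['(', '['] : List Char) then pvExpands grammar f (opt.drop 1).dropLast
              else if first = '_' then
                (grammar.lookup (String.ofList opt)).elim false fun nxt => pvExpands grammar f nxt.toList
              else decide (first ≠ '"')) := by
  intro L
  induction L with
  | nil => simp [pvCTloop]
  | cons option rest ih =>
    rw [pvCTloop, List.any_cons, ← ih]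
    rw [PySem.List.pyGet?_neg_one, PySem.List.pyGet?_zero, ← List.head?_eq_getElem?]
    cases hL : option.getLast? with
    | none => cases hH : option.head? <;> simp
    | some l =>
      cases hH : option.head? with
      | none => simp
      | some h =>
        simp only [Option.elim]
        by_cases hb1 : l = '*' ∨ l = '+' ∨ l = '?'
        · have hmem : l ∈ (['*', '+', '?'] : List Char) := by simpa using hb1
          rw [if_pos hb1, PySem.List.slice_zero_start, PySem.List.slice_to_neg_one, IH]
          cases hx : pvExpands grammar f option.dropLast <;> simp [hmem]
        · have hmem : l ∉ (['*', '+', '?'] : List Char) := by simpa using hb1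
          rw [if_neg hb1]
          by_cases hb2 : h = '(' ∨ h = '['
          · have hmem2 : h ∈ (['(', '['] : List Char) := by simpa using hb2
            rw [if_pos hb2, slice_1_neg1, IH]
            cases hx : pvExpands grammar f (option.drop 1).dropLast <;> simp [hmem, hmem2]
          · have hmem2 : h ∉ (['(', '['] : List Char) := by simpa using hb2
            rw [if_neg hb2]
            by_cases hb3 : h = '_'
            · rw [if_pos hb3]
              cases hlk : grammar.lookup (String.ofList option) with
              | none => simp [hmem, hb3, hlk]
              | some nr =>
                simp only [hlk]
                rw [IH]
                cases hx : pvExpands grammar f nr.toList <;> simp [hmem, hb3]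
            · rw [if_neg hb3]
              by_cases hb4 : h = '"' <;> simp [hmem, hmem2, hb3, hb4]

theorem main_eq' (grammar : List (String × String)) :
    ∀ (fuel : Nat) (g : List Char), pvCT grammar fuel g = pvExpands grammar fuel g := by
  intro fuel
  induction fuel with
  | zero => intro g; rfl
  | succ f ihf =>
    intro g
    rw [pvCT, pvExpands, tok_eq', PySem.List.foldl_append_singleton_eq_map]
    simp only [opt_eq]
    exact loop_any grammar f ihf _

-- ===== VERDICT (by name: the statement is the Claim_ definition above) =====
theorem creates_tree_spec : Claim_equal_creates_tree := by
  intro grammar group _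
  unfold Spec_creates_tree creates_tree creates_tree_alt
  exact main_eq' grammar _ group.toList
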